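-- pv_equiv track=rewrite | github.com/samjtwestlake/recipe-ml | common/utilities.py | addNeighbourFeatures
-- ===== SOURCE A (Python) =====
-- class Params:
--     ELEMENT_NEIGHBOUR_RANGE = 5
--     NO_RANDOM_NEGATIVE_SAMPLES = 20
--     RANGE_TRAINING_CROP_FACTOR = 4
--
--     URLS_DATA_FP = "./data/urls.text"
--     URLS_INGREDNO_DATA_FP = "./data/urlsIngredNo.txt"
--
--     WORD_COUNT_FEATURE_NAME = "wordCount"
--     INGREDIENTS_FEATURE_NAME = "ingredients"
--     NUMBERS_FEATURE_NAME = "numbers"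
--     UNITS_FEATURE_NAME = "units"
--
--     IMPERATIVES_FEATURE_NAME = "imperatives"
--     UTENSILS_FEATURE_NAME = "utensils"
--
--     NUTR_INFO_FEATURE_NAME = "nutrInfo"
--
--     DATE_TIME_FEATURE_NAME = "dateTime"
--
--     FEATURE_NAMES = [INGREDIENTS_FEATURE_NAME, IMPERATIVES_FEATURE_NAME, UNITS_FEATURE_NAME, UTENSILS_FEATURE_NAME, NUTR_INFO_FEATURE_NAME]
--
--     LABELLED_CANDS_DATA_FOLDER = "./data/labelledCandidates/"
--     FEATURE_TEMPLATE_DATA_FOLDER = "./data/featureTemplates/"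
--
--     TRAINING_DATA_FP = "./data/trainingData.txt"
--     FEATURE_TEMPLATE_DATA_FPS = {
--         INGREDIENTS_FEATURE_NAME: FEATURE_TEMPLATE_DATA_FOLDER + "ingredients.txt",
--         IMPERATIVES_FEATURE_NAME: FEATURE_TEMPLATE_DATA_FOLDER + "imperatives.txt",
--         UNITS_FEATURE_NAME: FEATURE_TEMPLATE_DATA_FOLDER + "units.txt",
--         UTENSILS_FEATURE_NAME: FEATURE_TEMPLATE_DATA_FOLDER + "utensils.txt",
--         NUTR_INFO_FEATURE_NAME: FEATURE_TEMPLATE_DATA_FOLDER + "nutritionalInformation.txt",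
--         DATE_TIME_FEATURE_NAME: FEATURE_TEMPLATE_DATA_FOLDER + "dateTimes.txt"
--     }
--
-- def addNeighbourFeatures(X):
--     def deriveNeighbourVec(subX, n):
--         vec = [0]*(n-1)
--         for v in subX:
--             for i, val in enumerate(v[1:]):
--                 vec[i] += val
--         return vec
--
--     n = Params.ELEMENT_NEIGHBOUR_RANGE
--     # preVecs, postVecs = [], []
--     addVecs = []
--     for i in range(len(X)):
--         i1 = max(i-n,0)
--         i2 = min(i+n, len(X)-1)
--         preX = X[i1:i]
--         postX = X[i+1:i2+1]
--         addVec = deriveNeighbourVec(preX + postX, len(X[0]))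
--         addVecs.append(addVec)
--         # preVec = deriveNeighbourVec(preX, len(X[0]))
--         # postVec = deriveNeighbourVec(postX, len(X[0]))
--         # preVecs.append(preVec)
--         # postVecs.append(postVec)
--
--     # X = [X[i] + preVecs[i] + postVecs[i] for i in range(len(X))]
--     X = [X[i] + addVecs[i] for i in range(len(X))]
--     return X
-- ===== SOURCE B (Python) =====
-- def addNeighbourFeatures(X):
--     # Prefix-sum reformulation: one pass builds cumulative column sums of the
--     # feature tails, then each window sum is an O(1) difference.
--     if not X:
--         return []
--     n = 5
--     m = len(X[0]) - 1
--
--     def padTail(v):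
--         return [v[j + 1] if j + 1 < len(v) else 0 for j in range(m)]
--
--     P = [[0] * m]
--     acc = [0] * m
--     for v in X:
--         t = padTail(v)
--         acc = [acc[j] + t[j] for j in range(m)]
--         P.append(acc)
--
--     out = []
--     for i, v in enumerate(X):
--         i1 = max(i - n, 0)
--         i2 = min(i + n, len(X) - 1)
--         t = padTail(v)
--         out.append(v + [P[i2 + 1][j] - P[i1][j] - t[j] for j in range(m)])
--     return out
-- ===== Notes on version B (the rewrite author's own statement) =====
-- stated objective: faster
-- what changed: B builds one cumulative (prefix-sum) table of the feature-column sums and obtains each row's neighbour-window sum as a difference of two table rows minus the row itself, instead of A's re-summing the up-to-10 window rows for every index.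
import Mathlib
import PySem

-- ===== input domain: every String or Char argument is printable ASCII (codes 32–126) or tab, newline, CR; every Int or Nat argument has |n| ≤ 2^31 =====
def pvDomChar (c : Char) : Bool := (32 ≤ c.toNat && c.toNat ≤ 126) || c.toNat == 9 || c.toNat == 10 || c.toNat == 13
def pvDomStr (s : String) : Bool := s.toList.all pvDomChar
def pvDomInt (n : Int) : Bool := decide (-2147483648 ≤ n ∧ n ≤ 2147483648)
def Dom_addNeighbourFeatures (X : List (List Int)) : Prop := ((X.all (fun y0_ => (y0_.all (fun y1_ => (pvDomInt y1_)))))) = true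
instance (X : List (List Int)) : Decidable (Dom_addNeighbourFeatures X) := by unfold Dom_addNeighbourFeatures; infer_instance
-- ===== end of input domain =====

-- B replaces A's per-row re-scan of the neighbour window by a single prefix-sum table
-- over the feature columns, so each window sum becomes a constant-size difference.

-- ===== PORT A =====
-- vec[i] += val: PySem.List.pySetD / pyGetD are the total forms of Python's indexed
-- update (Python raises IndexError out of range; those inputs are outside Pre_)
def pvBump (vec : List Int) (i : Int) (val : Int) : List Int :=
  PySem.List.pySetD vec i (PySem.List.pyGetD vec i 0 + val)

def pvDeriveNeighbourVec (subX : List (List Int)) (n : Int) : List Int :=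
  subX.foldl
    (fun vec v =>
      (PySem.List.enumerate (PySem.List.slice v (some 1) none) 0).foldl
        (fun vec p => pvBump vec p.1 p.2) vec)
    (List.replicate (n - 1).toNat 0)

def addNeighbourFeatures (X : List (List Int)) : List (List Int) :=
  let n : Int := 5
  let addVecs :=
    (PySem.List.pyRange 0 (PySem.List.len X) 1).foldl
      (fun addVecs i =>
        let i1 := max (i - n) 0
        let i2 := min (i + n) (PySem.List.len X - 1)
        let preX := PySem.List.slice X (some i1) (some i)
        let postX := PySem.List.slice X (some (i + 1)) (some (i2 + 1))
        addVecs ++ [pvDeriveNeighbourVec (preX ++ postX)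
                      (PySem.List.len (PySem.List.pyGetD X 0 []))])
      []
  (PySem.List.pyRange 0 (PySem.List.len X) 1).map
    (fun i => PySem.List.pyGetD X i [] ++ PySem.List.pyGetD addVecs i [])

-- ===== PORT B =====
-- [v[j+1] if j+1 < len(v) else 0 for j in range(m)]
def pvPadTail (m : Nat) (v : List Int) : List Int :=
  (List.range m).map (fun j => if j + 1 < v.length then v.getD (j + 1) 0 else 0)

def addNeighbourFeatures_alt (X : List (List Int)) : List (List Int) :=
  match X with
  | [] => []
  | x0 :: _ =>
    -- Python's m = len(X[0]) - 1 may be -1; range(m) is then empty, as with Nat subtraction here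
    let m : Nat := x0.length - 1
    let PA :=
      X.foldl
        (fun (s : List (List Int) × List Int) v =>
          let t := pvPadTail m v
          let acc := (List.range m).map (fun j => s.2.getD j 0 + t.getD j 0)
          (s.1 ++ [acc], acc))
        ([List.replicate m 0], List.replicate m 0)
    let P := PA.1
    (PySem.List.enumerate X 0).foldl
      (fun out p =>
        let i1 := max (p.1 - 5) 0
        let i2 := min (p.1 + 5) (PySem.List.len X - 1)
        let t := pvPadTail m p.2
        out ++ [p.2 ++ (List.range m).map
          (fun j => (PySem.List.pyGetD P (i2 + 1) []).getD j 0
                    - (PySem.List.pyGetD P i1 []).getD j 0 - t.getD j 0)])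
      []

-- ===== PRECONDITION & SPEC =====
-- Pre_ excludes exactly the inputs on which A raises IndexError: any row longer than
-- max(len(X[0]), 1) lies in some neighbour window and overruns A's accumulator vec.
def Pre_addNeighbourFeatures (X : List (List Int)) : Prop :=
  ∀ v ∈ X, v.length ≤ max (X.headD []).length 1
instance (X : List (List Int)) : Decidable (Pre_addNeighbourFeatures X) := by
  unfold Pre_addNeighbourFeatures; infer_instance

def pvWitness_addNeighbourFeatures : List (List Int) := [[1, 2], [3, 4], [0, 1]]

def Spec_addNeighbourFeatures (X : List (List Int)) (out : List (List Int)) : Prop := out = addNeighbourFeatures_alt X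
instance (X : List (List Int)) (out : List (List Int)) : Decidable (Spec_addNeighbourFeatures X out) := by unfold Spec_addNeighbourFeatures; infer_instance

-- ===== CLAIM (what is proved, stated in full; the proofs are below) =====
def Claim_equal_addNeighbourFeatures : Prop := ∀ (X : List (List Int)), Dom_addNeighbourFeatures X → Pre_addNeighbourFeatures X → Spec_addNeighbourFeatures X (addNeighbourFeatures X)

-- ===== LEMMAS AND PROOFS =====

lemma pvBump_natCast (vec : List Int) (k : Nat) (val : Int) :
    pvBump vec (k : Int) val = vec.set k (vec.getD k 0 + val) := by
  simp [pvBump]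

lemma getD_set (vec : List Int) (k j : Nat) (a : Int) (hk : k < vec.length) :
    (vec.set k a).getD j 0 = if j = k then a else vec.getD j 0 := by
  by_cases hjk : j = k
  · subst hjk; simp [List.getD_eq_getElem?_getD, hk]
  · rw [List.getD_eq_getElem?_getD, List.getD_eq_getElem?_getD, List.getElem?_set,
      if_neg (fun h => hjk h.symm), if_neg hjk]

lemma A_row (ts : List Int) (k : Nat) (vec : List Int) (h : k + ts.length ≤ vec.length) :
    ((PySem.List.enumerate ts (k : Int)).foldl (fun vec p => pvBump vec p.1 p.2) vec).length
        = vec.length ∧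
    ∀ j : Nat, ((PySem.List.enumerate ts (k : Int)).foldl
        (fun vec p => pvBump vec p.1 p.2) vec).getD j 0
      = vec.getD j 0 + (if k ≤ j ∧ j < k + ts.length then ts.getD (j - k) 0 else 0) := by
  induction ts generalizing k vec with
  | nil => simp [PySem.List.enumerate]
  | cons t ts ih =>
    rw [PySem.List.enumerate_cons, List.foldl_cons]
    have hcast : (k : Int) + 1 = ((k + 1 : Nat) : Int) := by push_cast; ring
    rw [show ((k:Int), t).1 = (k:Int) from rfl, show ((k:Int), t).2 = t from rfl] at *
    rw [pvBump_natCast, hcast]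
    have hk : k < vec.length := by simp at h; omega
    have h' : (k + 1) + ts.length ≤ (vec.set k (vec.getD k 0 + t)).length := by
      simp at h ⊢; omega
    obtain ⟨ihl, ihg⟩ := ih (k + 1) _ h'
    refine ⟨by rw [ihl]; simp, fun j => ?_⟩
    rw [ihg j, getD_set vec k j _ hk]
    by_cases hj : j = k
    · subst hj
      simp [List.length_cons]
    · by_cases hin : k + 1 ≤ j ∧ j < k + 1 + ts.length
      · have h3 : k ≤ j ∧ j < k + (t :: ts).length := by
          simp only [List.length_cons]; omega
        rw [if_pos hin, if_pos h3, if_neg hj]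
        rw [show j - k = (j - (k + 1)) + 1 by omega, List.getD_cons_succ]
      · have h3 : ¬(k ≤ j ∧ j < k + (t :: ts).length) := by
          simp only [List.length_cons]; omega
        rw [if_neg hin, if_neg h3, if_neg hj]

lemma A_row_tail (v vec : List Int) (h : v.length ≤ vec.length + 1) :
    ((PySem.List.enumerate (PySem.List.slice v (some 1) none) 0).foldl
        (fun vec p => pvBump vec p.1 p.2) vec).length = vec.length ∧
    ∀ j : Nat, ((PySem.List.enumerate (PySem.List.slice v (some 1) none) 0).foldl
        (fun vec p => pvBump vec p.1 p.2) vec).getD j 0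
      = vec.getD j 0 + v.getD (j + 1) 0 := by
  rw [PySem.List.slice_from_one]
  have hlen : v.tail.length ≤ vec.length := by simp [List.length_tail]; omega
  obtain ⟨hl, hg⟩ := A_row v.tail 0 vec (by omega)
  refine ⟨hl, fun j => ?_⟩
  rw [show ((0:Nat):Int) = (0:Int) by norm_num] at hg
  rw [hg j]
  congr 1
  by_cases hj : j < v.tail.length
  · rw [if_pos ⟨Nat.zero_le _, by omega⟩]
    simp only [Nat.sub_zero]
    rw [List.getD_eq_getElem?_getD, List.getD_eq_getElem?_getD, List.getElem?_tail]
  · rw [if_neg (by omega)]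
    rw [List.getD_eq_getElem?_getD, List.getElem?_eq_none (by simp at hj ⊢; omega)]
    rfl

lemma A_dnv_aux (m : Nat) (rows : List (List Int)) (vec : List Int)
    (hv : vec.length = m) (h : ∀ v ∈ rows, v.length ≤ m + 1) :
    rows.foldl
      (fun vec v =>
        (PySem.List.enumerate (PySem.List.slice v (some 1) none) 0).foldl
          (fun vec p => pvBump vec p.1 p.2) vec) vec
      = (List.range m).map
          (fun j => vec.getD j 0 + (rows.map (fun v => v.getD (j + 1) 0)).sum) := by
  induction rows generalizing vec with
  | nil =>
    simp only [List.foldl_nil, List.map_nil, List.sum_nil, add_zero]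
    apply List.ext_getElem
    · simp [hv]
    · intro j h1 h2
      simp only [List.getElem_map, List.getElem_range]
      rw [List.getD_eq_getElem _ _ (by omega)]
  | cons v rows ih =>
    rw [List.foldl_cons]
    obtain ⟨hl, hg⟩ := A_row_tail v vec (by have := h v (by simp); omega)
    rw [ih _ (by rw [hl, hv]) (fun w hw => h w (by simp [hw]))]
    apply List.map_congr_left
    intro j hj
    rw [hg j]
    simp only [List.map_cons, List.sum_cons]
    ring

lemma A_dnv (rows : List (List Int)) (n : Int) (m : Nat) (hm : (n - 1).toNat = m)
    (h : ∀ v ∈ rows, v.length ≤ m + 1) :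
    pvDeriveNeighbourVec rows n
      = (List.range m).map (fun j => (rows.map (fun v => v.getD (j + 1) 0)).sum) := by
  unfold pvDeriveNeighbourVec
  rw [hm, A_dnv_aux m rows _ (by simp) h]
  apply List.map_congr_left
  intro j hj
  rw [List.getD_eq_getElem?_getD]
  simp at hj
  simp [hj]

def pvColS (X : List (List Int)) (k : Nat) (j : Nat) : Int :=
  ((X.take k).map (fun v => v.getD (j + 1) 0)).sum

def pvAccStep (m : Nat) (acc : List Int) (v : List Int) : List Int :=
  (List.range m).map (fun j => acc.getD j 0 + (pvPadTail m v).getD j 0)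

def pvAccList (m : Nat) (acc : List Int) : List (List Int) → List (List Int)
  | [] => []
  | v :: r => pvAccStep m acc v :: pvAccList m (pvAccStep m acc v) r

lemma B_foldP (m : Nat) (rest : List (List Int)) (P0 : List (List Int)) (acc : List Int) :
    rest.foldl
      (fun (s : List (List Int) × List Int) v =>
        let t := pvPadTail m v
        let a := (List.range m).map (fun j => s.2.getD j 0 + t.getD j 0)
        (s.1 ++ [a], a)) (P0, acc)
      = (P0 ++ pvAccList m acc rest, (pvAccList m acc rest).getLastD acc) := by
  induction rest generalizing P0 acc with
  | nil => simp [pvAccList]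
  | cons v r ih =>
    rw [List.foldl_cons]
    simp only []
    rw [ih]
    simp only [pvAccList, pvAccStep, List.cons_append, List.append_assoc, Prod.mk.injEq, List.getLastD_eq_getLast?]
    refine ⟨rfl, ?_⟩
    cases h : pvAccList m ((List.range m).map
        (fun j => acc.getD j 0 + (pvPadTail m v).getD j 0)) r <;>
      simp [List.getLast?_cons]

lemma getD_padTail (m : Nat) (v : List Int) (j : Nat) (hj : j < m) :
    (pvPadTail m v).getD j 0 = v.getD (j + 1) 0 := by
  unfold pvPadTail
  rw [List.getD_eq_getElem?_getD]
  rw [List.getElem?_map, List.getElem?_range hj]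
  by_cases h : j + 1 < v.length
  · simp [h]
  · simp only [Option.map_some, Option.getD_some, if_neg h]
    rw [List.getD_eq_getElem?_getD, List.getElem?_eq_none (by omega)]
    rfl

lemma getD_range_map (m j : Nat) (f : Nat → Int) (hj : j < m) :
    (((List.range m).map f).getD j 0) = f j := by
  rw [List.getD_eq_getElem?_getD, List.getElem?_map, List.getElem?_range hj]
  rfl

lemma B_accList_getD (m : Nat) (rest : List (List Int)) (acc : List Int) (k : Nat)
    (hk : k < rest.length) :
    (pvAccList m acc rest).getD k []
      = (List.range m).map (fun j => acc.getD j 0 + pvColS rest (k + 1) j) := by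
  induction rest generalizing acc k with
  | nil => simp at hk
  | cons v r ih =>
    cases k with
    | zero =>
      simp only [pvAccList, List.getD_cons_zero, pvAccStep, pvColS]
      apply List.map_congr_left
      intro j hj
      simp only [List.mem_range] at hj
      rw [getD_padTail m v j hj]
      simp
    | succ k =>
      simp only [pvAccList, List.getD_cons_succ]
      rw [ih _ _ (by simp at hk; omega)]
      apply List.map_congr_left
      intro j hj
      simp only [List.mem_range] at hj
      simp only [pvAccStep]
      rw [getD_range_map m j _ hj, getD_padTail m v j hj]
      simp only [pvColS, List.take_succ_cons, List.map_cons, List.sum_cons]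
      ring

def pvSpecVec (X : List (List Int)) (m i : Nat) : List Int :=
  (List.range m).map (fun j =>
    pvColS X (min (i + 5) (X.length - 1) + 1) j - pvColS X (i - 5) j
      - (X.getD i []).getD (j + 1) 0)

lemma colS_zero (X : List (List Int)) (j : Nat) : pvColS X 0 j = 0 := by
  simp [pvColS]

lemma colS_succ (X : List (List Int)) (i : Nat) (hi : i < X.length) (j : Nat) :
    pvColS X (i + 1) j = pvColS X i j + (X.getD i []).getD (j + 1) 0 := by
  unfold pvColS
  rw [List.take_add_one, List.map_append, List.sum_append,
    List.getElem?_eq_getElem hi, List.getD_eq_getElem _ _ hi]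
  simp

lemma P_getD (X : List (List Int)) (m : Nat) (a : Nat) (ha : a ≤ X.length)
    (j : Nat) (hj : j < m) :
    ((List.replicate m (0:Int) :: pvAccList m (List.replicate m 0) X).getD a []).getD j 0
      = pvColS X a j := by
  cases a with
  | zero =>
    rw [List.getD_cons_zero, colS_zero, List.getD_eq_getElem?_getD,
      List.getElem?_replicate]
    simp [hj]
  | succ k =>
    rw [List.getD_cons_succ, B_accList_getD m X _ k (by omega),
      getD_range_map m j _ hj]
    rw [List.getD_eq_getElem?_getD, List.getElem?_replicate]
    simp [hj]

lemma A_length (X : List (List Int)) : (addNeighbourFeatures X).length = X.length := by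
  unfold addNeighbourFeatures
  simp [PySem.List.length_pyRange_one]

lemma B_length (X : List (List Int)) :
    (addNeighbourFeatures_alt X).length = X.length := by
  unfold addNeighbourFeatures_alt
  cases X with
  | nil => rfl
  | cons x0 xs =>
    simp only []
    rw [PySem.List.foldl_append_singleton_eq_map]
    simp [PySem.List.length_enumerate]

lemma B_elem (X : List (List Int)) (hX : X ≠ []) (i : Nat) (hi : i < X.length) :
    (addNeighbourFeatures_alt X).getD i []
      = X.getD i [] ++ pvSpecVec X ((X.headD []).length - 1) i := by
  cases X with
  | nil => exact absurd rfl hX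
  | cons x0 xs =>
    set X := x0 :: xs with hXdef
    set m : Nat := x0.length - 1 with hm
    have hBmap : addNeighbourFeatures_alt X
        = (PySem.List.enumerate X 0).map (fun p =>
            p.2 ++ (List.range m).map
              (fun j =>
                (PySem.List.pyGetD
                    ((X.foldl
                      (fun (s : List (List Int) × List Int) v =>
                        let t := pvPadTail m v
                        let acc := (List.range m).map (fun j => s.2.getD j 0 + t.getD j 0)
                        (s.1 ++ [acc], acc))
                      ([List.replicate m 0], List.replicate m 0)).1)
                    (min (p.1 + 5) (PySem.List.len X - 1) + 1) []).getD j 0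
                - (PySem.List.pyGetD
                    ((X.foldl
                      (fun (s : List (List Int) × List Int) v =>
                        let t := pvPadTail m v
                        let acc := (List.range m).map (fun j => s.2.getD j 0 + t.getD j 0)
                        (s.1 ++ [acc], acc))
                      ([List.replicate m 0], List.replicate m 0)).1)
                    (max (p.1 - 5) 0) []).getD j 0
                - (pvPadTail m p.2).getD j 0)) := by
      exact PySem.List.foldl_append_singleton_eq_map _ _ _
    rw [hBmap]
    rw [B_foldP]
    have hlen : (PySem.List.enumerate X 0).length = X.length :=
      PySem.List.length_enumerate _ _
    rw [List.getD_eq_getElem _ _ (by rw [List.length_map, hlen]; exact hi),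
      List.getElem_map, PySem.List.getElem_enumerate]
    congr 1
    · simp [List.getElem?_eq_getElem hi]
    · unfold pvSpecVec
      apply List.map_congr_left
      intro j hj
      simp only [List.mem_range] at hj
      have hL : 1 ≤ X.length := by simp [hXdef]
      have hc1 : min ((0 + (i:Int)) + 5) (PySem.List.len X - 1) + 1
          = ((min (i + 5) (X.length - 1) + 1 : Nat) : Int) := by
        simp only [PySem.List.len_eq]; omega
      have hc2 : max ((0 + (i:Int)) - 5) 0 = ((i - 5 : Nat) : Int) := by omega
      rw [hc1, hc2, PySem.List.pyGetD_natCast, PySem.List.pyGetD_natCast]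
      have hsingle : [List.replicate m (0:Int)] ++ pvAccList m (List.replicate m 0) X
          = List.replicate m (0:Int) :: pvAccList m (List.replicate m 0) X := by simp
      rw [hsingle]
      rw [P_getD X m _ (by omega) j hj, P_getD X m _ (by omega) j hj,
        getD_padTail m _ j hj]
      congr 2
      simp [List.getElem?_eq_getElem hi]

lemma pv_sum_slice (X : List (List Int)) (f : List Int → Int) (a b : Nat) (hab : a ≤ b) :
    (((X.drop a).take (b - a)).map f).sum
      = ((X.take b).map f).sum - ((X.take a).map f).sum := by
  have h : X.take b = X.take a ++ (X.drop a).take (b - a) := by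
    rw [← List.take_add]; congr 1; omega
  rw [h, List.map_append, List.sum_append]; ring

lemma getD_map_pyRange_len {α : Type} (F : Int → α) (L : Nat) (i : Nat) (hi : i < L)
    (d : α) : (((PySem.List.pyRange 0 (L : Int) 1).map F).getD i d) = F (i : Int) := by
  rw [PySem.List.pyRange_one, List.map_map]
  have hL : ((L : Int) - 0).toNat = L := by omega
  rw [List.getD_eq_getElem _ _ (by simp [hi])]
  simp

lemma A_elem (X : List (List Int)) (hX : X ≠ [])
    (hPre : Pre_addNeighbourFeatures X) (i : Nat) (hi : i < X.length) :
    (addNeighbourFeatures X).getD i []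
      = X.getD i [] ++ pvSpecVec X ((X.headD []).length - 1) i := by
  cases X with
  | nil => exact absurd rfl hX
  | cons x0 xs =>
    set X := x0 :: xs with hXdef
    set m : Nat := x0.length - 1 with hm
    set g : Int → List Int := fun ii =>
      pvDeriveNeighbourVec
        (PySem.List.slice X (some (max (ii - 5) 0)) (some ii)
          ++ PySem.List.slice X (some (ii + 1))
              (some (min (ii + 5) (PySem.List.len X - 1) + 1)))
        (PySem.List.len (PySem.List.pyGetD X 0 [])) with hg
    have hA : addNeighbourFeatures X
        = (PySem.List.pyRange 0 (PySem.List.len X) 1).map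
            (fun ii => PySem.List.pyGetD X ii []
              ++ PySem.List.pyGetD
                   ((PySem.List.pyRange 0 (PySem.List.len X) 1).map g) ii []) := by
      unfold addNeighbourFeatures
      have hfold := PySem.List.foldl_append_singleton_eq_map
        (l := PySem.List.pyRange 0 (PySem.List.len X) 1) (f := g)
        (acc := ([] : List (List Int)))
      simp only [hg] at hfold
      simp only []
      rw [hfold]
      simp only [List.nil_append]
      rw [← hg]
    rw [hA]
    have hlenX : PySem.List.len X = ((X.length : Nat) : Int) := PySem.List.len_eq X
    rw [hlenX, getD_map_pyRange_len _ _ i hi]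
    rw [PySem.List.pyGetD_natCast, PySem.List.pyGetD_natCast]
    congr 1
    rw [getD_map_pyRange_len _ _ i hi]
    simp only [hg]
    -- rewrite the slice bounds through Nat casts
    have hL : 1 ≤ X.length := by simp [hXdef]
    have hc1 : max ((i : Int) - 5) 0 = ((i - 5 : Nat) : Int) := by omega
    have hc2 : (i : Int) + 1 = ((i + 1 : Nat) : Int) := by push_cast; ring
    have hc3 : min ((i : Int) + 5) (PySem.List.len X - 1) + 1
        = ((min (i + 5) (X.length - 1) + 1 : Nat) : Int) := by
      rw [hlenX]; omega
    rw [hc1, hc2, hc3, PySem.List.slice_natCast, PySem.List.slice_natCast]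
    have hx0 : PySem.List.pyGetD X 0 [] = x0 := by
      rw [PySem.List.pyGetD_zero]; rfl
    rw [hx0, PySem.List.len_eq]
    have hmax : max x0.length 1 = m + 1 := by omega
    have hbound : ∀ v ∈ (X.drop (i - 5)).take (i - (i - 5))
        ++ (X.drop (i + 1)).take (min (i + 5) (X.length - 1) + 1 - (i + 1)),
        v.length ≤ m + 1 := by
      intro v hv
      rw [← hmax]
      refine hPre v ?_
      rcases List.mem_append.mp hv with h | h
      · exact List.mem_of_mem_drop (List.mem_of_mem_take h)
      · exact List.mem_of_mem_drop (List.mem_of_mem_take h)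
    rw [A_dnv _ _ m (by omega) hbound]
    unfold pvSpecVec
    apply List.map_congr_left
    intro j hj
    simp only [List.mem_range] at hj
    rw [List.map_append, List.sum_append]
    have hab : i - 5 ≤ i := by omega
    have hib : i + 1 ≤ min (i + 5) (X.length - 1) + 1 := by omega
    rw [pv_sum_slice X _ (i - 5) i hab,
      pv_sum_slice X _ (i + 1) (min (i + 5) (X.length - 1) + 1) hib]
    show (pvColS X i j - pvColS X (i - 5) j)
        + (pvColS X (min (i + 5) (X.length - 1) + 1) j - pvColS X (i + 1) j)
      = pvColS X (min (i + 5) (X.length - 1) + 1) j - pvColS X (i - 5) j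
        - (X.getD i []).getD (j + 1) 0
    rw [colS_succ X i hi j]
    ring

-- ===== VERDICT (by name: the statement is the Claim_ definition above) =====
theorem addNeighbourFeatures_spec : Claim_equal_addNeighbourFeatures := by
  intro X _ hPre
  unfold Spec_addNeighbourFeatures
  rcases X with _ | ⟨x0, xs⟩
  · rfl
  · apply List.ext_getElem
    · rw [A_length, B_length]
    · intro i h1 h2
      have hi : i < (x0 :: xs).length := by simpa [A_length] using h1
      have hA := A_elem (x0 :: xs) (by simp) hPre i hi
      have hB := B_elem (x0 :: xs) (by simp) i hi
      rw [List.getD_eq_getElem _ _ h1] at hA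
      rw [List.getD_eq_getElem _ _ h2] at hB
      rw [hA, hB]
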